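-- pv_equiv track=rewrite | github.com/lebahoang/cp | leetcode/466.py | s2_chars
-- ===== SOURCE A (Python) =====
-- def s2_chars(s2):
--     c = 0
--     cur = ''
--     for i in s2:
--         if cur == '':
--             cur = i
--         elif i != cur:
--             return -1
--         c += 1
--     return c
-- ===== SOURCE B (Python) =====
-- def s2_chars(s2):
--     items = list(s2)
--     return len(items) if len(set(items)) <= 1 else -1
-- ===== Notes on version B (the rewrite author's own statement) =====
-- stated objective: simpler
-- what changed: Replaces the early-exit loop with a running counter and a sentinel variable by a full materialization plus a distinct-element (set) cardinality test: len(items) when at most one distinct char, else -1.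
import Mathlib
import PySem

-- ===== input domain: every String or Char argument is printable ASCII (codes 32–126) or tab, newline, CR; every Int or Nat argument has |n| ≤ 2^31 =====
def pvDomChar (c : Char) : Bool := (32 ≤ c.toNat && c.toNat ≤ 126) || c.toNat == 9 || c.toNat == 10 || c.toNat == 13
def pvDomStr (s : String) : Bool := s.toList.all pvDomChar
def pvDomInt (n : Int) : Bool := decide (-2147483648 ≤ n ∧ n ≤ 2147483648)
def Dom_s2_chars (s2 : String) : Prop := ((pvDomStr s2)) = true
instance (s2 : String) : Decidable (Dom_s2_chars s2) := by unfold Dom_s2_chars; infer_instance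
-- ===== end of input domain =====

-- B replaces A's early-exit loop with a current-char sentinel by a set-cardinality test: simpler.


-- ===== PORT A =====
-- Python's cur starts as '' and then always holds one char: Option Char models the sentinel.
def s2charsLoop : List Char → Int → Option Char → Int
  | [], c, _ => c
  | i :: t, c, none => s2charsLoop t (c + 1) (some i)
  | i :: t, c, some cur => if i ≠ cur then -1 else s2charsLoop t (c + 1) (some cur)

def s2_chars (s2 : String) : Int := s2charsLoop s2.toList 0 none

-- ===== PORT B =====
def s2_chars_alt (s2 : String) : Int :=
  let items := s2.toList
  if (PySem.Set.ofList items).length ≤ 1 then (items.length : Int) else -1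

-- ===== PRECONDITION & SPEC =====
def Spec_s2_chars (s2 : String) (out : Int) : Prop := out = s2_chars_alt s2
instance (s2 : String) (out : Int) : Decidable (Spec_s2_chars s2 out) := by unfold Spec_s2_chars; infer_instance

-- ===== CLAIM (what is proved, stated in full; the proofs are below) =====
def Claim_equal_s2_chars : Prop := ∀ (s2 : String), Dom_s2_chars s2 → Spec_s2_chars s2 (s2_chars s2)

-- ===== LEMMAS AND PROOFS =====

-- A's loop after fixing 'cur': counts if every remaining char equals cur, else -1.
theorem s2charsLoop_some (t : List Char) (c : Int) (cur : Char) :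
    s2charsLoop t c (some cur) =
      if t.all (· == cur) then c + t.length else -1 := by
  induction t generalizing c with
  | nil => simp [s2charsLoop]
  | cons i t ih =>
    by_cases h : i = cur
    · subst h
      rw [s2charsLoop, if_neg (by simp), ih, List.all_cons]
      by_cases ht : t.all (· == i) = true
      · simp [ht]; push_cast; ring
      · simp [ht]
    · simp [s2charsLoop, h, List.all_cons]

theorem two_le_length_of_mem {i j : Char} {l : List Char} (hi : i ∈ l) (hj : j ∈ l)
    (hne : i ≠ j) : 2 ≤ l.length := by
  cases l with
  | nil => simp at hi
  | cons x r =>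
    cases r with
    | nil =>
      simp at hi hj
      subst hi; subst hj; exact absurd rfl hne
    | cons y r' => simp

theorem set_singleton_iff_all (i : Char) (t : List Char) :
    (PySem.Set.ofList (i :: t)).length ≤ 1 ↔ t.all (· == i) = true := by
  induction t generalizing i with
  | nil => simp [PySem.Set.ofList]
  | cons j t ih =>
    by_cases h : j = i
    · subst h
      constructor
      · intro hlen
        simp only [List.all_cons, beq_self_eq_true, Bool.true_and]
        have : (PySem.Set.ofList (j :: t)).length ≤ 1 := by
          simpa [PySem.Set.ofList, List.foldl, PySem.Set.add, PySem.Set.contains] using hlen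
        exact (ih j).mp this
      · intro hall
        simp only [List.all_cons, beq_self_eq_true, Bool.true_and] at hall
        simpa [PySem.Set.ofList, List.foldl, PySem.Set.add, PySem.Set.contains] using (ih j).mpr hall
    · constructor
      · intro hlen
        exfalso
        have hmem : i ∈ PySem.Set.ofList (i :: j :: t) := by
          simp [PySem.Set.mem_ofList]
        have hmem' : j ∈ PySem.Set.ofList (i :: j :: t) := by
          simp [PySem.Set.mem_ofList]
        have h2 : 2 ≤ (PySem.Set.ofList (i :: j :: t)).length :=
          two_le_length_of_mem hmem hmem' (fun hc => h hc.symm)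
        omega
      · intro hall
        simp [List.all_cons] at hall
        exact absurd hall.1 (by simp [h])

theorem s2_chars_eq (s2 : String) : s2_chars s2 = s2_chars_alt s2 := by
  unfold s2_chars s2_chars_alt
  cases hl : s2.toList with
  | nil => simp [s2charsLoop, PySem.Set.ofList]
  | cons i t =>
    simp only [s2charsLoop, s2charsLoop_some]
    rcases Decidable.em (t.all (· == i) = true) with h | h
    · rw [if_pos h, if_pos ((set_singleton_iff_all i t).mpr h)]
      simp; ring
    · rw [if_neg h, if_neg (fun hc => h ((set_singleton_iff_all i t).mp hc))]

-- ===== VERDICT (by name: the statement is the Claim_ definition above) =====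
theorem s2_chars_spec : Claim_equal_s2_chars := by
  intro s2 _
  unfold Spec_s2_chars
  exact s2_chars_eq s2
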